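-- pv_equiv track=rewrite | github.com/a8594755-maker/Decision-Intelligence- | src/ml/api/replenishment_solver_common.py | summarize_infeasibility
-- ===== SOURCE A (Python) =====
-- from typing import Any, Callable, Dict, List, Optional, Set, Tuple
--
-- def suggestions_for_categories(categories: Set[str]) -> List[str]:
--     actions: List[str] = []
--     if "safety_stock" in categories:
--         actions.append("Lower safety stock targets or increase supply to maintain buffer levels.")
--     if "capacity" in categories:
--         actions.append("Increase shared production/inventory capacity in constrained periods.")
--         actions.append("Reduce demand target or allow backlog for constrained periods.")
--     if "budget" in categories:
--         actions.append("Increase shared budget cap or prioritize lower-cost SKUs.")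
--     if "moq_pack" in categories:
--         actions.append("Reduce MOQ/pack constraints or relax max_order_qty caps.")
--     if "lead_time" in categories:
--         actions.append("Reduce lead times or bring in open POs earlier.")
--     if "demand_infeasible" in categories:
--         actions.append("Lower service_level_target or increase supply capacity.")
--     if "bom_shortage" in categories:
--         actions.append("Increase component supply or adjust BOM usage assumptions.")
--     if not actions:
--         actions.append("Relax one hard constraint family at a time and retry.")
--     return actions[:6]
--
-- def summarize_infeasibility(tags: List[str]) -> Dict[str, Any]:
--     categories: Set[str] = set()
--     for tag in tags:
--         if tag.startswith("CAP_PROD") or tag.startswith("CAP_INV") or tag.startswith("CAP_VOL") or tag.startswith("CAP_WEIGHT"):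
--             categories.add("capacity")
--         elif tag.startswith("BUDGET_GLOBAL") or tag.startswith("BUDGET_PERIOD"):
--             categories.add("budget")
--         elif tag.startswith("MOQ") or tag.startswith("PACK") or tag.startswith("MAXQ"):
--             categories.add("moq_pack")
--         elif tag.startswith("BALANCE_INV"):
--             categories.add("lead_time")
--         elif tag.startswith("SAFETY_STOCK"):
--             categories.add("safety_stock")
--         elif tag.startswith("SERVICE_LEVEL_GLOBAL"):
--             categories.add("demand_infeasible")
--         elif tag.startswith("BOM_LINK") or tag.startswith("COMP_FEAS"):
--             categories.add("bom_shortage")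
--
--     category_list = sorted(categories) if categories else ["capacity"]
--     suggestions_list = suggestions_for_categories(set(category_list))
--     return {
--         "categories": category_list,
--         "top_offending_tags": sorted(set(tags))[:12],
--         "suggestions": suggestions_list,
--     }
-- ===== SOURCE B (Python) =====
-- # Table-driven re-implementation: one pass over an ordered category table
-- # (already in sorted-name order) instead of a per-tag elif cascade + set + sort.
--
-- _CATEGORY_RULES = [
--     ("bom_shortage", ("BOM_LINK", "COMP_FEAS")),
--     ("budget", ("BUDGET_GLOBAL", "BUDGET_PERIOD")),
--     ("capacity", ("CAP_PROD", "CAP_INV", "CAP_VOL", "CAP_WEIGHT")),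
--     ("demand_infeasible", ("SERVICE_LEVEL_GLOBAL",)),
--     ("lead_time", ("BALANCE_INV",)),
--     ("moq_pack", ("MOQ", "PACK", "MAXQ")),
--     ("safety_stock", ("SAFETY_STOCK",)),
-- ]
--
-- _SUGGESTION_TABLE = [
--     ("safety_stock", ["Lower safety stock targets or increase supply to maintain buffer levels."]),
--     ("capacity", ["Increase shared production/inventory capacity in constrained periods.",
--                   "Reduce demand target or allow backlog for constrained periods."]),
--     ("budget", ["Increase shared budget cap or prioritize lower-cost SKUs."]),
--     ("moq_pack", ["Reduce MOQ/pack constraints or relax max_order_qty caps."]),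
--     ("lead_time", ["Reduce lead times or bring in open POs earlier."]),
--     ("demand_infeasible", ["Lower service_level_target or increase supply capacity."]),
--     ("bom_shortage", ["Increase component supply or adjust BOM usage assumptions."]),
-- ]
--
--
-- def summarize_infeasibility(tags):
--     category_list = [cat for cat, prefixes in _CATEGORY_RULES
--                      if any(t.startswith(p) for t in tags for p in prefixes)]
--     if not category_list:
--         category_list = ["capacity"]
--     suggestions = [msg for cat, msgs in _SUGGESTION_TABLE if cat in category_list
--                    for msg in msgs]
--     return {
--         "categories": category_list,
--         "top_offending_tags": sorted(set(tags))[:12],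
--         "suggestions": suggestions[:6],
--     }
-- ===== Notes on version B (the rewrite author's own statement) =====
-- stated objective: idiomatic
-- what changed: Replaces the per-tag elif cascade into a set plus a later sort by a single comprehension over an ordered prefix-rule table (already in sorted category order, so set+sorted disappear), and replaces the append-if chain in suggestions_for_categories by a filtered suggestion table.
import Mathlib
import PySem

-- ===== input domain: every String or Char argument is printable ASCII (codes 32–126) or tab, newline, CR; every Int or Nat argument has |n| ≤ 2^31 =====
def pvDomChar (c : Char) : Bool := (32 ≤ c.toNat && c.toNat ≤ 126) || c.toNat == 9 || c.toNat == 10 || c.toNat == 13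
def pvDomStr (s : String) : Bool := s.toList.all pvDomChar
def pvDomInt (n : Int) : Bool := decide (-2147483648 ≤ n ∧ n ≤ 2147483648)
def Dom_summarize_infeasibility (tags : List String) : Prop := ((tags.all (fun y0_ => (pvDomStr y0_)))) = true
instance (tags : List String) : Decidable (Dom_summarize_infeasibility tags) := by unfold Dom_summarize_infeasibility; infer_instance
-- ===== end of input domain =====

-- B replaces A's per-tag elif cascade + set + sort by one pass over an ordered category table
-- (names already in sorted order) and a table-driven suggestion list (objective: idiomatic).

-- ===== PORT A =====
def suggestions_for_categories (categories : PySem.Set String) : List String :=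
  let actions : List String := []
  let actions := if PySem.Set.contains categories "safety_stock" then
    actions ++ ["Lower safety stock targets or increase supply to maintain buffer levels."] else actions
  let actions := if PySem.Set.contains categories "capacity" then
    actions ++ ["Increase shared production/inventory capacity in constrained periods."]
            ++ ["Reduce demand target or allow backlog for constrained periods."] else actions
  let actions := if PySem.Set.contains categories "budget" then
    actions ++ ["Increase shared budget cap or prioritize lower-cost SKUs."] else actions
  let actions := if PySem.Set.contains categories "moq_pack" then
    actions ++ ["Reduce MOQ/pack constraints or relax max_order_qty caps."] else actions
  let actions := if PySem.Set.contains categories "lead_time" then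
    actions ++ ["Reduce lead times or bring in open POs earlier."] else actions
  let actions := if PySem.Set.contains categories "demand_infeasible" then
    actions ++ ["Lower service_level_target or increase supply capacity."] else actions
  let actions := if PySem.Set.contains categories "bom_shortage" then
    actions ++ ["Increase component supply or adjust BOM usage assumptions."] else actions
  let actions := if actions = [] then
    actions ++ ["Relax one hard constraint family at a time and retry."] else actions
  PySem.List.slice actions none (some 6)

def summarize_infeasibility (tags : List String) : List (String × List String) :=
  let categories : PySem.Set String := tags.foldl (fun categories tag =>
    if PySem.Str.startswith tag "CAP_PROD" || PySem.Str.startswith tag "CAP_INV" ||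
       PySem.Str.startswith tag "CAP_VOL" || PySem.Str.startswith tag "CAP_WEIGHT" then
      PySem.Set.add categories "capacity"
    else if PySem.Str.startswith tag "BUDGET_GLOBAL" || PySem.Str.startswith tag "BUDGET_PERIOD" then
      PySem.Set.add categories "budget"
    else if PySem.Str.startswith tag "MOQ" || PySem.Str.startswith tag "PACK" ||
            PySem.Str.startswith tag "MAXQ" then
      PySem.Set.add categories "moq_pack"
    else if PySem.Str.startswith tag "BALANCE_INV" then
      PySem.Set.add categories "lead_time"
    else if PySem.Str.startswith tag "SAFETY_STOCK" then
      PySem.Set.add categories "safety_stock"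
    else if PySem.Str.startswith tag "SERVICE_LEVEL_GLOBAL" then
      PySem.Set.add categories "demand_infeasible"
    else if PySem.Str.startswith tag "BOM_LINK" || PySem.Str.startswith tag "COMP_FEAS" then
      PySem.Set.add categories "bom_shortage"
    else categories) PySem.Set.empty
  let category_list := if categories = [] then ["capacity"]
    else PySem.List.sorted categories (fun x => x) false
  let suggestions_list := suggestions_for_categories (PySem.Set.ofList category_list)
  [("categories", category_list),
   ("top_offending_tags",
     PySem.List.slice (PySem.List.sorted (PySem.Set.ofList tags) (fun x => x) false) none (some 12)),
   ("suggestions", suggestions_list)]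

-- ===== PORT B =====
def pvCategoryRules : List (String × List String) :=
  [("bom_shortage", ["BOM_LINK", "COMP_FEAS"]),
   ("budget", ["BUDGET_GLOBAL", "BUDGET_PERIOD"]),
   ("capacity", ["CAP_PROD", "CAP_INV", "CAP_VOL", "CAP_WEIGHT"]),
   ("demand_infeasible", ["SERVICE_LEVEL_GLOBAL"]),
   ("lead_time", ["BALANCE_INV"]),
   ("moq_pack", ["MOQ", "PACK", "MAXQ"]),
   ("safety_stock", ["SAFETY_STOCK"])]

def pvSuggestionTable : List (String × List String) :=
  [("safety_stock", ["Lower safety stock targets or increase supply to maintain buffer levels."]),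
   ("capacity", ["Increase shared production/inventory capacity in constrained periods.",
                 "Reduce demand target or allow backlog for constrained periods."]),
   ("budget", ["Increase shared budget cap or prioritize lower-cost SKUs."]),
   ("moq_pack", ["Reduce MOQ/pack constraints or relax max_order_qty caps."]),
   ("lead_time", ["Reduce lead times or bring in open POs earlier."]),
   ("demand_infeasible", ["Lower service_level_target or increase supply capacity."]),
   ("bom_shortage", ["Increase component supply or adjust BOM usage assumptions."])]

def summarize_infeasibility_alt (tags : List String) : List (String × List String) :=
  let category_list :=
    (pvCategoryRules.filter (fun r =>
      tags.any (fun t => r.2.any (fun p => PySem.Str.startswith t p)))).map (fun r => r.1)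
  let category_list := if category_list = [] then ["capacity"] else category_list
  let suggestions :=
    (pvSuggestionTable.filter (fun r => category_list.contains r.1)).flatMap (fun r => r.2)
  [("categories", category_list),
   ("top_offending_tags",
     PySem.List.slice (PySem.List.sorted (PySem.Set.ofList tags) (fun x => x) false) none (some 12)),
   ("suggestions", PySem.List.slice suggestions none (some 6))]

-- ===== PRECONDITION & SPEC =====
def Spec_summarize_infeasibility (tags : List String) (out : List (String × List String)) : Prop := out = summarize_infeasibility_alt tags
instance (tags : List String) (out : List (String × List String)) : Decidable (Spec_summarize_infeasibility tags out) := by unfold Spec_summarize_infeasibility; infer_instance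

-- ===== CLAIM (what is proved, stated in full; the proofs are below) =====
def Claim_equal_summarize_infeasibility : Prop := ∀ (tags : List String), Dom_summarize_infeasibility tags → Spec_summarize_infeasibility tags (summarize_infeasibility tags)

-- ===== LEMMAS AND PROOFS =====

-- A's per-tag classifier (the elif chain), as an Option-valued function
def pvClassify (tag : String) : Option String :=
  if PySem.Str.startswith tag "CAP_PROD" || PySem.Str.startswith tag "CAP_INV" ||
     PySem.Str.startswith tag "CAP_VOL" || PySem.Str.startswith tag "CAP_WEIGHT" then
    some "capacity"
  else if PySem.Str.startswith tag "BUDGET_GLOBAL" || PySem.Str.startswith tag "BUDGET_PERIOD" then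
    some "budget"
  else if PySem.Str.startswith tag "MOQ" || PySem.Str.startswith tag "PACK" ||
          PySem.Str.startswith tag "MAXQ" then
    some "moq_pack"
  else if PySem.Str.startswith tag "BALANCE_INV" then some "lead_time"
  else if PySem.Str.startswith tag "SAFETY_STOCK" then some "safety_stock"
  else if PySem.Str.startswith tag "SERVICE_LEVEL_GLOBAL" then some "demand_infeasible"
  else if PySem.Str.startswith tag "BOM_LINK" || PySem.Str.startswith tag "COMP_FEAS" then
    some "bom_shortage"
  else none

-- A's fold is Set.ofList of the classified tags
set_option maxHeartbeats 1000000 in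
lemma pvFoldA (tags : List String) (s : PySem.Set String) :
    tags.foldl (fun categories tag =>
      if PySem.Str.startswith tag "CAP_PROD" || PySem.Str.startswith tag "CAP_INV" ||
         PySem.Str.startswith tag "CAP_VOL" || PySem.Str.startswith tag "CAP_WEIGHT" then
        PySem.Set.add categories "capacity"
      else if PySem.Str.startswith tag "BUDGET_GLOBAL" || PySem.Str.startswith tag "BUDGET_PERIOD" then
        PySem.Set.add categories "budget"
      else if PySem.Str.startswith tag "MOQ" || PySem.Str.startswith tag "PACK" ||
              PySem.Str.startswith tag "MAXQ" then
        PySem.Set.add categories "moq_pack"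
      else if PySem.Str.startswith tag "BALANCE_INV" then
        PySem.Set.add categories "lead_time"
      else if PySem.Str.startswith tag "SAFETY_STOCK" then
        PySem.Set.add categories "safety_stock"
      else if PySem.Str.startswith tag "SERVICE_LEVEL_GLOBAL" then
        PySem.Set.add categories "demand_infeasible"
      else if PySem.Str.startswith tag "BOM_LINK" || PySem.Str.startswith tag "COMP_FEAS" then
        PySem.Set.add categories "bom_shortage"
      else categories) s
    = (tags.filterMap pvClassify).foldl PySem.Set.add s := by
  induction tags generalizing s with
  | nil => rfl
  | cons t ts ih =>
    rw [List.foldl_cons, List.filterMap_cons]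
    unfold pvClassify
    split_ifs <;> exact ih _

-- two prefixes, neither a prefix of the other, cannot both start the same string
lemma pvSwNot (t p q : String) (hp : PySem.Str.startswith t p = true)
    (h1 : ¬ (p.toList <+: q.toList)) (h2 : ¬ (q.toList <+: p.toList)) :
    PySem.Str.startswith t q = false := by
  rw [PySem.Str.startswith_eq] at hp ⊢
  rw [PySem.Chars.startswith_iff] at hp
  cases hq : PySem.Chars.startswith t.toList q.toList
  · rfl
  · exfalso
    rw [PySem.Chars.startswith_iff] at hq
    rcases List.prefix_or_prefix_of_prefix hp hq with h | h
    · exact h1 h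
    · exact h2 h

lemma pvClassify_iff_capacity (t : String) :
    pvClassify t = some "capacity" ↔ (["CAP_PROD", "CAP_INV", "CAP_VOL", "CAP_WEIGHT"] : List String).any (fun p => PySem.Str.startswith t p) = true := by
  constructor
  · intro hcl
    unfold pvClassify at hcl
    split_ifs at hcl <;> simp_all <;> tauto
  · intro hany
    simp only [List.any_cons, List.any_nil, Bool.or_false, Bool.or_eq_true] at hany
    rcases hany with h|h|h|h
    · simp only [pvClassify, h,
          Bool.or_true, Bool.true_or, Bool.or_false, Bool.false_or]
      simp
    · simp only [pvClassify, h,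
          Bool.or_true, Bool.true_or, Bool.or_false, Bool.false_or]
      simp
    · simp only [pvClassify, h,
          Bool.or_true, Bool.true_or, Bool.or_false, Bool.false_or]
      simp
    · simp only [pvClassify, h,
          Bool.or_true, Bool.true_or, Bool.or_false, Bool.false_or]
      simp

lemma pvClassify_iff_budget (t : String) :
    pvClassify t = some "budget" ↔ (["BUDGET_GLOBAL", "BUDGET_PERIOD"] : List String).any (fun p => PySem.Str.startswith t p) = true := by
  constructor
  · intro hcl
    unfold pvClassify at hcl
    split_ifs at hcl <;> simp_all <;> tauto
  · intro hany
    simp only [List.any_cons, List.any_nil, Bool.or_false, Bool.or_eq_true] at hany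
    rcases hany with h|h
    · simp only [pvClassify, h,
        pvSwNot t "BUDGET_GLOBAL" "CAP_PROD" h (by decide) (by decide),
        pvSwNot t "BUDGET_GLOBAL" "CAP_INV" h (by decide) (by decide),
        pvSwNot t "BUDGET_GLOBAL" "CAP_VOL" h (by decide) (by decide),
        pvSwNot t "BUDGET_GLOBAL" "CAP_WEIGHT" h (by decide) (by decide),
          Bool.or_true, Bool.true_or, Bool.or_false, Bool.false_or]
      simp
    · simp only [pvClassify, h,
        pvSwNot t "BUDGET_PERIOD" "CAP_PROD" h (by decide) (by decide),
        pvSwNot t "BUDGET_PERIOD" "CAP_INV" h (by decide) (by decide),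
        pvSwNot t "BUDGET_PERIOD" "CAP_VOL" h (by decide) (by decide),
        pvSwNot t "BUDGET_PERIOD" "CAP_WEIGHT" h (by decide) (by decide),
          Bool.or_true, Bool.true_or, Bool.or_false, Bool.false_or]
      simp

lemma pvClassify_iff_moq_pack (t : String) :
    pvClassify t = some "moq_pack" ↔ (["MOQ", "PACK", "MAXQ"] : List String).any (fun p => PySem.Str.startswith t p) = true := by
  constructor
  · intro hcl
    unfold pvClassify at hcl
    split_ifs at hcl <;> simp_all <;> tauto
  · intro hany
    simp only [List.any_cons, List.any_nil, Bool.or_false, Bool.or_eq_true] at hany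
    rcases hany with h|h|h
    · simp only [pvClassify, h,
        pvSwNot t "MOQ" "CAP_PROD" h (by decide) (by decide),
        pvSwNot t "MOQ" "CAP_INV" h (by decide) (by decide),
        pvSwNot t "MOQ" "CAP_VOL" h (by decide) (by decide),
        pvSwNot t "MOQ" "CAP_WEIGHT" h (by decide) (by decide),
        pvSwNot t "MOQ" "BUDGET_GLOBAL" h (by decide) (by decide),
        pvSwNot t "MOQ" "BUDGET_PERIOD" h (by decide) (by decide),
          Bool.or_true, Bool.true_or, Bool.or_false, Bool.false_or]
      simp
    · simp only [pvClassify, h,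
        pvSwNot t "PACK" "CAP_PROD" h (by decide) (by decide),
        pvSwNot t "PACK" "CAP_INV" h (by decide) (by decide),
        pvSwNot t "PACK" "CAP_VOL" h (by decide) (by decide),
        pvSwNot t "PACK" "CAP_WEIGHT" h (by decide) (by decide),
        pvSwNot t "PACK" "BUDGET_GLOBAL" h (by decide) (by decide),
        pvSwNot t "PACK" "BUDGET_PERIOD" h (by decide) (by decide),
          Bool.or_true, Bool.true_or, Bool.or_false, Bool.false_or]
      simp
    · simp only [pvClassify, h,
        pvSwNot t "MAXQ" "CAP_PROD" h (by decide) (by decide),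
        pvSwNot t "MAXQ" "CAP_INV" h (by decide) (by decide),
        pvSwNot t "MAXQ" "CAP_VOL" h (by decide) (by decide),
        pvSwNot t "MAXQ" "CAP_WEIGHT" h (by decide) (by decide),
        pvSwNot t "MAXQ" "BUDGET_GLOBAL" h (by decide) (by decide),
        pvSwNot t "MAXQ" "BUDGET_PERIOD" h (by decide) (by decide),
          Bool.or_true, Bool.true_or, Bool.or_false, Bool.false_or]
      simp

lemma pvClassify_iff_lead_time (t : String) :
    pvClassify t = some "lead_time" ↔ (["BALANCE_INV"] : List String).any (fun p => PySem.Str.startswith t p) = true := by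
  constructor
  · intro hcl
    unfold pvClassify at hcl
    split_ifs at hcl <;> simp_all <;> tauto
  · intro hany
    simp only [List.any_cons, List.any_nil, Bool.or_false, Bool.or_eq_true] at hany
    have h := hany
    simp only [pvClassify, h,
        pvSwNot t "BALANCE_INV" "CAP_PROD" h (by decide) (by decide),
        pvSwNot t "BALANCE_INV" "CAP_INV" h (by decide) (by decide),
        pvSwNot t "BALANCE_INV" "CAP_VOL" h (by decide) (by decide),
        pvSwNot t "BALANCE_INV" "CAP_WEIGHT" h (by decide) (by decide),
        pvSwNot t "BALANCE_INV" "BUDGET_GLOBAL" h (by decide) (by decide),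
        pvSwNot t "BALANCE_INV" "BUDGET_PERIOD" h (by decide) (by decide),
        pvSwNot t "BALANCE_INV" "MOQ" h (by decide) (by decide),
        pvSwNot t "BALANCE_INV" "PACK" h (by decide) (by decide),
        pvSwNot t "BALANCE_INV" "MAXQ" h (by decide) (by decide),
        Bool.or_true, Bool.true_or, Bool.or_false, Bool.false_or]
    simp

lemma pvClassify_iff_safety_stock (t : String) :
    pvClassify t = some "safety_stock" ↔ (["SAFETY_STOCK"] : List String).any (fun p => PySem.Str.startswith t p) = true := by
  constructor
  · intro hcl
    unfold pvClassify at hcl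
    split_ifs at hcl <;> simp_all <;> tauto
  · intro hany
    simp only [List.any_cons, List.any_nil, Bool.or_false, Bool.or_eq_true] at hany
    have h := hany
    simp only [pvClassify, h,
        pvSwNot t "SAFETY_STOCK" "CAP_PROD" h (by decide) (by decide),
        pvSwNot t "SAFETY_STOCK" "CAP_INV" h (by decide) (by decide),
        pvSwNot t "SAFETY_STOCK" "CAP_VOL" h (by decide) (by decide),
        pvSwNot t "SAFETY_STOCK" "CAP_WEIGHT" h (by decide) (by decide),
        pvSwNot t "SAFETY_STOCK" "BUDGET_GLOBAL" h (by decide) (by decide),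
        pvSwNot t "SAFETY_STOCK" "BUDGET_PERIOD" h (by decide) (by decide),
        pvSwNot t "SAFETY_STOCK" "MOQ" h (by decide) (by decide),
        pvSwNot t "SAFETY_STOCK" "PACK" h (by decide) (by decide),
        pvSwNot t "SAFETY_STOCK" "MAXQ" h (by decide) (by decide),
        pvSwNot t "SAFETY_STOCK" "BALANCE_INV" h (by decide) (by decide),
        Bool.or_true, Bool.true_or, Bool.or_false, Bool.false_or]
    simp

lemma pvClassify_iff_demand_infeasible (t : String) :
    pvClassify t = some "demand_infeasible" ↔ (["SERVICE_LEVEL_GLOBAL"] : List String).any (fun p => PySem.Str.startswith t p) = true := by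
  constructor
  · intro hcl
    unfold pvClassify at hcl
    split_ifs at hcl <;> simp_all <;> tauto
  · intro hany
    simp only [List.any_cons, List.any_nil, Bool.or_false, Bool.or_eq_true] at hany
    have h := hany
    simp only [pvClassify, h,
        pvSwNot t "SERVICE_LEVEL_GLOBAL" "CAP_PROD" h (by decide) (by decide),
        pvSwNot t "SERVICE_LEVEL_GLOBAL" "CAP_INV" h (by decide) (by decide),
        pvSwNot t "SERVICE_LEVEL_GLOBAL" "CAP_VOL" h (by decide) (by decide),
        pvSwNot t "SERVICE_LEVEL_GLOBAL" "CAP_WEIGHT" h (by decide) (by decide),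
        pvSwNot t "SERVICE_LEVEL_GLOBAL" "BUDGET_GLOBAL" h (by decide) (by decide),
        pvSwNot t "SERVICE_LEVEL_GLOBAL" "BUDGET_PERIOD" h (by decide) (by decide),
        pvSwNot t "SERVICE_LEVEL_GLOBAL" "MOQ" h (by decide) (by decide),
        pvSwNot t "SERVICE_LEVEL_GLOBAL" "PACK" h (by decide) (by decide),
        pvSwNot t "SERVICE_LEVEL_GLOBAL" "MAXQ" h (by decide) (by decide),
        pvSwNot t "SERVICE_LEVEL_GLOBAL" "BALANCE_INV" h (by decide) (by decide),
        pvSwNot t "SERVICE_LEVEL_GLOBAL" "SAFETY_STOCK" h (by decide) (by decide),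
        Bool.or_true, Bool.true_or, Bool.or_false, Bool.false_or]
    simp

lemma pvClassify_iff_bom_shortage (t : String) :
    pvClassify t = some "bom_shortage" ↔ (["BOM_LINK", "COMP_FEAS"] : List String).any (fun p => PySem.Str.startswith t p) = true := by
  constructor
  · intro hcl
    unfold pvClassify at hcl
    split_ifs at hcl <;> simp_all <;> tauto
  · intro hany
    simp only [List.any_cons, List.any_nil, Bool.or_false, Bool.or_eq_true] at hany
    rcases hany with h|h
    · simp only [pvClassify, h,
        pvSwNot t "BOM_LINK" "CAP_PROD" h (by decide) (by decide),
        pvSwNot t "BOM_LINK" "CAP_INV" h (by decide) (by decide),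
        pvSwNot t "BOM_LINK" "CAP_VOL" h (by decide) (by decide),
        pvSwNot t "BOM_LINK" "CAP_WEIGHT" h (by decide) (by decide),
        pvSwNot t "BOM_LINK" "BUDGET_GLOBAL" h (by decide) (by decide),
        pvSwNot t "BOM_LINK" "BUDGET_PERIOD" h (by decide) (by decide),
        pvSwNot t "BOM_LINK" "MOQ" h (by decide) (by decide),
        pvSwNot t "BOM_LINK" "PACK" h (by decide) (by decide),
        pvSwNot t "BOM_LINK" "MAXQ" h (by decide) (by decide),
        pvSwNot t "BOM_LINK" "BALANCE_INV" h (by decide) (by decide),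
        pvSwNot t "BOM_LINK" "SAFETY_STOCK" h (by decide) (by decide),
        pvSwNot t "BOM_LINK" "SERVICE_LEVEL_GLOBAL" h (by decide) (by decide),
          Bool.or_true, Bool.true_or, Bool.or_false, Bool.false_or]
      simp
    · simp only [pvClassify, h,
        pvSwNot t "COMP_FEAS" "CAP_PROD" h (by decide) (by decide),
        pvSwNot t "COMP_FEAS" "CAP_INV" h (by decide) (by decide),
        pvSwNot t "COMP_FEAS" "CAP_VOL" h (by decide) (by decide),
        pvSwNot t "COMP_FEAS" "CAP_WEIGHT" h (by decide) (by decide),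
        pvSwNot t "COMP_FEAS" "BUDGET_GLOBAL" h (by decide) (by decide),
        pvSwNot t "COMP_FEAS" "BUDGET_PERIOD" h (by decide) (by decide),
        pvSwNot t "COMP_FEAS" "MOQ" h (by decide) (by decide),
        pvSwNot t "COMP_FEAS" "PACK" h (by decide) (by decide),
        pvSwNot t "COMP_FEAS" "MAXQ" h (by decide) (by decide),
        pvSwNot t "COMP_FEAS" "BALANCE_INV" h (by decide) (by decide),
        pvSwNot t "COMP_FEAS" "SAFETY_STOCK" h (by decide) (by decide),
        pvSwNot t "COMP_FEAS" "SERVICE_LEVEL_GLOBAL" h (by decide) (by decide),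
          Bool.or_true, Bool.true_or, Bool.or_false, Bool.false_or]
      simp


-- the classifier agrees with B's any-prefix match, rule by rule
lemma pvClassify_iff (t : String) (r : String × List String) (hr : r ∈ pvCategoryRules) :
    pvClassify t = some r.1 ↔ r.2.any (fun p => PySem.Str.startswith t p) = true := by
  simp only [pvCategoryRules, List.mem_cons, List.not_mem_nil, or_false] at hr
  rcases hr with rfl | rfl | rfl | rfl | rfl | rfl | rfl
  · exact pvClassify_iff_bom_shortage t
  · exact pvClassify_iff_budget t
  · exact pvClassify_iff_capacity t
  · exact pvClassify_iff_demand_infeasible t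
  · exact pvClassify_iff_lead_time t
  · exact pvClassify_iff_moq_pack t
  · exact pvClassify_iff_safety_stock t

-- the classifier only produces the seven rule names
lemma pvClassify_names (t : String) (c : String) (h : pvClassify t = some c) :
    c ∈ pvCategoryRules.map (fun r => r.1) := by
  unfold pvClassify at h
  split_ifs at h <;>
    first
      | exact Option.noConfusion h
      | (injection h with h; subst h; simp [pvCategoryRules])

-- membership in A's classified-tag list = membership in B's filtered category list
lemma pvMemL (tags : List String) (c : String) :
    (∃ t ∈ tags, pvClassify t = some c) ↔
      c ∈ (pvCategoryRules.filter (fun r =>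
        tags.any (fun t => r.2.any (fun p => PySem.Str.startswith t p)))).map (fun r => r.1) := by
  constructor
  · rintro ⟨t, ht, hc⟩
    have hcmem := pvClassify_names t c hc
    simp only [List.mem_map] at hcmem ⊢
    obtain ⟨r, hr, hrc⟩ := hcmem
    refine ⟨r, ?_, hrc⟩
    rw [List.mem_filter]
    refine ⟨hr, ?_⟩
    rw [List.any_eq_true]
    refine ⟨t, ht, (pvClassify_iff t r hr).mp ?_⟩
    rw [hrc]
    exact hc
  · intro hc
    simp only [List.mem_map, List.mem_filter] at hc
    obtain ⟨r, ⟨hr, hpred⟩, rfl⟩ := hc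
    rw [List.any_eq_true] at hpred
    obtain ⟨t, ht, hp⟩ := hpred
    exact ⟨t, ht, (pvClassify_iff t r hr).mpr hp⟩

-- the suggestion builders agree on any nonempty category list drawn from the 7 names
set_option maxHeartbeats 4000000 in
lemma pvSugg_eq (CL : List String) (hne : CL ≠ [])
    (hsub : ∀ c ∈ CL, c ∈ (["bom_shortage", "budget", "capacity", "demand_infeasible", "lead_time", "moq_pack", "safety_stock"] : List String)) :
    suggestions_for_categories (PySem.Set.ofList CL)
      = PySem.List.slice
          ((pvSuggestionTable.filter (fun r => CL.contains r.1)).flatMap (fun r => r.2))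
          none (some 6) := by
  have hc : ∀ n : String, PySem.Set.contains (PySem.Set.ofList CL) n = CL.contains n := by
    intro n
    rw [Bool.eq_iff_iff, PySem.Set.contains_iff, PySem.Set.mem_ofList, List.contains_iff_mem]
  have hx : "bom_shortage" ∈ CL ∨ "budget" ∈ CL ∨ "capacity" ∈ CL ∨ "demand_infeasible" ∈ CL
      ∨ "lead_time" ∈ CL ∨ "moq_pack" ∈ CL ∨ "safety_stock" ∈ CL := by
    obtain ⟨x, xs, rfl⟩ : ∃ x xs, CL = x :: xs := by
      cases CL with
      | nil => exact absurd rfl hne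
      | cons a l => exact ⟨a, l, rfl⟩
    have h := hsub x (by simp)
    simp only [List.mem_cons, List.not_mem_nil, or_false] at h
    rcases h with rfl | rfl | rfl | rfl | rfl | rfl | rfl <;> simp
  unfold suggestions_for_categories pvSuggestionTable
  simp only [hc]
  by_cases h1 : CL.contains "safety_stock" = true <;>
  by_cases h2 : CL.contains "capacity" = true <;>
  by_cases h3 : CL.contains "budget" = true <;>
  by_cases h4 : CL.contains "moq_pack" = true <;>
  by_cases h5 : CL.contains "lead_time" = true <;>
  by_cases h6 : CL.contains "demand_infeasible" = true <;>
  by_cases h7 : CL.contains "bom_shortage" = true <;>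
    simp_all

-- ===== VERDICT (by name: the statement is the Claim_ definition above) =====
set_option maxHeartbeats 1000000 in
theorem summarize_infeasibility_spec : Claim_equal_summarize_infeasibility := by
  intro tags _
  unfold Spec_summarize_infeasibility
  simp only [summarize_infeasibility, summarize_infeasibility_alt]
  rw [pvFoldA]
  rw [show (PySem.Set.empty : PySem.Set String) = ([] : List String) from rfl]
  rw [← PySem.Set.ofList_eq_foldl]
  set cs := tags.filterMap pvClassify with hcs
  set L := (pvCategoryRules.filter (fun r =>
      tags.any (fun t => r.2.any (fun p => PySem.Str.startswith t p)))).map (fun r => r.1) with hL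
  have hmem : ∀ c, c ∈ PySem.Set.ofList cs ↔ c ∈ L := by
    intro c
    rw [PySem.Set.mem_ofList, hcs, hL, List.mem_filterMap]
    exact pvMemL tags c
  have hs : L.Sublist (pvCategoryRules.map (fun r => r.1)) := by
    rw [hL]
    exact List.Sublist.map _ List.filter_sublist
  have hnodL : L.Pairwise (fun a b : String => a < b) := by
    have hp : (pvCategoryRules.map (fun r => r.1)).Pairwise (fun a b : String => a < b) := by
      simp [pvCategoryRules, List.pairwise_cons]
      decide
    exact hp.sublist hs
  have hnodupL : L.Nodup := hnodL.imp (fun {a b} h => ne_of_lt h)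
  have hperm : L.Perm (PySem.Set.ofList cs) :=
    (List.perm_ext_iff_of_nodup hnodupL (PySem.Set.nodup_ofList cs)).mpr (fun a => (hmem a).symm)
  have hempty : PySem.Set.ofList cs = [] ↔ L = [] := by
    constructor <;> intro h <;> rw [List.eq_nil_iff_forall_not_mem] at h ⊢ <;> intro x hx
    · exact h x ((hmem x).mpr hx)
    · exact h x ((hmem x).mp hx)
  by_cases hS : PySem.Set.ofList cs = []
  · rw [if_pos hS, if_pos (hempty.mp hS),
        pvSugg_eq ["capacity"] (by simp) (by decide)]
  · have hLne : L ≠ [] := fun h => hS (hempty.mpr h)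
    rw [if_neg hS, if_neg hLne]
    have hsorted : PySem.List.sorted (PySem.Set.ofList cs) (fun x => x) false = L :=
      PySem.List.sorted_eq_of_perm_of_pairwise_lt _ _ _ hperm hnodL
    have hnames : ∀ c ∈ L, c ∈ (["bom_shortage", "budget", "capacity", "demand_infeasible", "lead_time", "moq_pack", "safety_stock"] : List String) := by
      intro c hc
      have h := hs.subset hc
      simpa [pvCategoryRules] using h
    rw [hsorted, pvSugg_eq L hLne hnames]
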